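-- pv_equiv track=rewrite | github.com/xuekunwu/SHAPE | app.py | generate_visual_description
-- ===== SOURCE A (Python) =====
-- def generate_visual_description(tool_name: str, result: dict, visual_outputs: list) -> str:
--     """
--     Generate dynamic visual description based on tool type and results.
--     """
--     if not visual_outputs:
--         return "*Ready to display analysis results and processed images.*"
--
--     # Count different types of images with a single pass
--     counts = {
--         "processed": 0,
--         "corrected": 0,
--         "segmented": 0,
--         "detected": 0,
--         "zoomed": 0,
--         "cropped": 0,
--         "analyzed": 0
--     }
--     for _, label in visual_outputs:
--         lower_label = str(label).lower()
--         if "processed" in lower_label: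
--             counts["processed"] += 1
--         if "corrected" in lower_label:
--             counts["corrected"] += 1
--         if "segmented" in lower_label:
--             counts["segmented"] += 1
--         if "detected" in lower_label:
--             counts["detected"] += 1
--         if "zoomed" in lower_label:
--             counts["zoomed"] += 1
--         if "crop" in lower_label:
--             counts["cropped"] += 1
--         if "analysis" in lower_label or "distribution" in lower_label:
--             counts["analyzed"] += 1
--
--     # Generate tool-specific descriptions
--     tool_descriptions = {
--         "Image_Preprocessor_Tool": f"*Displaying {counts['processed']} processed image(s) from illumination correction and brightness adjustment.*",
--         "Object_Detector_Tool": f"*Showing {counts['detected']} detection result(s) with identified objects and regions of interest.*",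
--         "Relevant_Patch_Zoomer_Tool": f"*Showing {counts['zoomed']} zoomed region(s) highlighting key areas of interest.*",
--         "Advanced_Object_Detector_Tool": f"*Displaying {counts['detected']} advanced detection result(s) with enhanced object identification.*",
--         "Nuclei_Segmenter_Tool": f"*Showing {counts['segmented']} segmentation result(s) with identified nuclei regions.*",
--         "Cell_Segmenter_Tool": f"*Showing {counts['segmented']} segmentation result(s) with identified cell regions in phase-contrast images.*",
--         "Organoid_Segmenter_Tool": f"*Showing {counts['segmented']} segmentation result(s) with identified organoid regions.*",
--         "Single_Cell_Cropper_Tool": f"*Displaying {counts['cropped']} single-cell crop(s) generated from segmentation results (nuclei, cells, or organoids).*",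
--         "Cell_State_Analyzer_Tool": f"*Displaying cell state analysis results from self-supervised learning with UMAP visualizations and clustering.*",
--         "Cell_Morphology_Analyzer_Tool": "*Displaying cell morphology analysis results with detailed structural insights.*",
--         "Fibroblast_Activation_Detector_Tool": "*Showing fibroblast activation state analysis with morphological indicators.*",
--         "Cell_State_Analyzer_Tool": f"*Displaying {counts['analyzed']} cell state analysis result(s) with cell state distributions and statistics.*"
--     }
--
--     # Return tool-specific description or generic one
--     if tool_name in tool_descriptions:
--         return tool_descriptions[tool_name]
--     else:
--         total_images = len(visual_outputs)
--         return f"*Displaying {total_images} analysis result(s) from {tool_name}.*"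
-- ===== SOURCE B (Python) =====
-- def generate_visual_description(tool_name: str, result: dict, visual_outputs: list) -> str:
--     """
--     Generate dynamic visual description based on tool type and results.
--     Dispatches on tool_name first and counts only the label substring that
--     tool actually needs (the duplicate dict key in the original makes the
--     UMAP variant of Cell_State_Analyzer_Tool unreachable, so only the
--     'analysis'/'distribution' count matters for it).
--     """
--     if not visual_outputs:
--         return "*Ready to display analysis results and processed images.*"
--
--     def count(*subs):
--         return sum(1 for _, label in visual_outputs
--                    if any(s in str(label).lower() for s in subs))
--
--     if tool_name == "Image_Preprocessor_Tool":
--         return f"*Displaying {count('processed')} processed image(s) from illumination correction and brightness adjustment.*"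
--     if tool_name == "Object_Detector_Tool":
--         return f"*Showing {count('detected')} detection result(s) with identified objects and regions of interest.*"
--     if tool_name == "Relevant_Patch_Zoomer_Tool":
--         return f"*Showing {count('zoomed')} zoomed region(s) highlighting key areas of interest.*"
--     if tool_name == "Advanced_Object_Detector_Tool":
--         return f"*Displaying {count('detected')} advanced detection result(s) with enhanced object identification.*"
--     if tool_name == "Nuclei_Segmenter_Tool":
--         return f"*Showing {count('segmented')} segmentation result(s) with identified nuclei regions.*"
--     if tool_name == "Cell_Segmenter_Tool":
--         return f"*Showing {count('segmented')} segmentation result(s) with identified cell regions in phase-contrast images.*"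
--     if tool_name == "Organoid_Segmenter_Tool":
--         return f"*Showing {count('segmented')} segmentation result(s) with identified organoid regions.*"
--     if tool_name == "Single_Cell_Cropper_Tool":
--         return f"*Displaying {count('crop')} single-cell crop(s) generated from segmentation results (nuclei, cells, or organoids).*"
--     if tool_name == "Cell_State_Analyzer_Tool":
--         return f"*Displaying {count('analysis', 'distribution')} cell state analysis result(s) with cell state distributions and statistics.*"
--     if tool_name == "Cell_Morphology_Analyzer_Tool":
--         return "*Displaying cell morphology analysis results with detailed structural insights.*"
--     if tool_name == "Fibroblast_Activation_Detector_Tool":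
--         return "*Showing fibroblast activation state analysis with morphological indicators.*"
--     return f"*Displaying {len(visual_outputs)} analysis result(s) from {tool_name}.*"
-- ===== Notes on version B (the rewrite author's own statement) =====
-- stated objective: simpler
-- what changed: Instead of building a seven-key counts dict for every label and an eleven-entry description dict and then looking up tool_name, B dispatches on tool_name first and counts only the one substring that tool's template needs (keeping only the reachable duplicate-key variant of Cell_State_Analyzer_Tool).
import Mathlib
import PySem

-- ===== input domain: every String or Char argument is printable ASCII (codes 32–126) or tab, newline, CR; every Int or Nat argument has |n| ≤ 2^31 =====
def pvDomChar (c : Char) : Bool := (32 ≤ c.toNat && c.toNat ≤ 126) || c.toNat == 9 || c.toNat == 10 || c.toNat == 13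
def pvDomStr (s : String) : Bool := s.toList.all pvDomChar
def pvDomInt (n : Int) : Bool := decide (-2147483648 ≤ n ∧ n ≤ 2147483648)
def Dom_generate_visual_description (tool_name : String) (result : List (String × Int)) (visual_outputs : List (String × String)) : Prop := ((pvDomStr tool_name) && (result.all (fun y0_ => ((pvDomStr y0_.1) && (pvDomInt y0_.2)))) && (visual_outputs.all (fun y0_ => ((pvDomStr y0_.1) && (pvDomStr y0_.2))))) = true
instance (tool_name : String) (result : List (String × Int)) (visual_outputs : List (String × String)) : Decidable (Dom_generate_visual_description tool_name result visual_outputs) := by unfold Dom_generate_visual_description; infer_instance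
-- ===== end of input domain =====

-- B dispatches on tool_name first and counts only the one substring that tool's template needs
-- (no counts dict, no descriptions dict); objective: simpler. Return values proved equal on all inputs.

-- ===== PORT A =====
-- the seven counters of A's `counts` dict (fixed literal keys), one named field per key
structure PVCounts where
  processed : Int
  corrected : Int
  segmented : Int
  detected : Int
  zoomed : Int
  cropped : Int
  analyzed : Int
deriving Repr, DecidableEq

-- A's loop body: the seven independent `if "…" in lower_label` increments, in source order
def pvStepA (c : PVCounts) (item : String × String) : PVCounts :=
  let ll := PySem.Str.lower item.2
  { processed := c.processed + (if PySem.Str.isIn "processed" ll then 1 else 0)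
    corrected := c.corrected + (if PySem.Str.isIn "corrected" ll then 1 else 0)
    segmented := c.segmented + (if PySem.Str.isIn "segmented" ll then 1 else 0)
    detected := c.detected + (if PySem.Str.isIn "detected" ll then 1 else 0)
    zoomed := c.zoomed + (if PySem.Str.isIn "zoomed" ll then 1 else 0)
    cropped := c.cropped + (if PySem.Str.isIn "crop" ll then 1 else 0)
    analyzed := c.analyzed + (if PySem.Str.isIn "analysis" ll || PySem.Str.isIn "distribution" ll then 1 else 0) }

def generate_visual_description (tool_name : String) (result : List (String × Int)) (visual_outputs : List (String × String)) : String :=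
  if visual_outputs = [] then
    "*Ready to display analysis results and processed images.*"
  else
    let counts := visual_outputs.foldl pvStepA ⟨0, 0, 0, 0, 0, 0, 0⟩
    -- the tool_descriptions dict literal; the duplicate "Cell_State_Analyzer_Tool" key overwrites in place
    let tool_descriptions : PySem.Dict String String :=
      (((((((((((PySem.Dict.empty.insert
        "Image_Preprocessor_Tool" ("*Displaying " ++ PySem.Int.toStr counts.processed ++ " processed image(s) from illumination correction and brightness adjustment.*")).insert
        "Object_Detector_Tool" ("*Showing " ++ PySem.Int.toStr counts.detected ++ " detection result(s) with identified objects and regions of interest.*")).insert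
        "Relevant_Patch_Zoomer_Tool" ("*Showing " ++ PySem.Int.toStr counts.zoomed ++ " zoomed region(s) highlighting key areas of interest.*")).insert
        "Advanced_Object_Detector_Tool" ("*Displaying " ++ PySem.Int.toStr counts.detected ++ " advanced detection result(s) with enhanced object identification.*")).insert
        "Nuclei_Segmenter_Tool" ("*Showing " ++ PySem.Int.toStr counts.segmented ++ " segmentation result(s) with identified nuclei regions.*")).insert
        "Cell_Segmenter_Tool" ("*Showing " ++ PySem.Int.toStr counts.segmented ++ " segmentation result(s) with identified cell regions in phase-contrast images.*")).insert
        "Organoid_Segmenter_Tool" ("*Showing " ++ PySem.Int.toStr counts.segmented ++ " segmentation result(s) with identified organoid regions.*")).insert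
        "Single_Cell_Cropper_Tool" ("*Displaying " ++ PySem.Int.toStr counts.cropped ++ " single-cell crop(s) generated from segmentation results (nuclei, cells, or organoids).*")).insert
        "Cell_State_Analyzer_Tool" "*Displaying cell state analysis results from self-supervised learning with UMAP visualizations and clustering.*").insert
        "Cell_Morphology_Analyzer_Tool" "*Displaying cell morphology analysis results with detailed structural insights.*").insert
        "Fibroblast_Activation_Detector_Tool" "*Showing fibroblast activation state analysis with morphological indicators.*").insert
        "Cell_State_Analyzer_Tool" ("*Displaying " ++ PySem.Int.toStr counts.analyzed ++ " cell state analysis result(s) with cell state distributions and statistics.*")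
    match tool_descriptions.get? tool_name with
    | some s => s
    | none => "*Displaying " ++ PySem.Int.toStr (visual_outputs.length : Int) ++ " analysis result(s) from " ++ tool_name ++ ".*"

-- ===== PORT B =====
-- Source B's `count(*subs)` helper: labels whose lowercase form contains one of the substrings
def pvCountLabel (visual_outputs : List (String × String)) (subs : List String) : Int :=
  (visual_outputs.countP (fun p => subs.any (fun s => PySem.Str.isIn s (PySem.Str.lower p.2))) : Int)

def generate_visual_description_alt (tool_name : String) (result : List (String × Int)) (visual_outputs : List (String × String)) : String :=
  if visual_outputs = [] then
    "*Ready to display analysis results and processed images.*"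
  else if tool_name = "Image_Preprocessor_Tool" then
    "*Displaying " ++ PySem.Int.toStr (pvCountLabel visual_outputs ["processed"]) ++ " processed image(s) from illumination correction and brightness adjustment.*"
  else if tool_name = "Object_Detector_Tool" then
    "*Showing " ++ PySem.Int.toStr (pvCountLabel visual_outputs ["detected"]) ++ " detection result(s) with identified objects and regions of interest.*"
  else if tool_name = "Relevant_Patch_Zoomer_Tool" then
    "*Showing " ++ PySem.Int.toStr (pvCountLabel visual_outputs ["zoomed"]) ++ " zoomed region(s) highlighting key areas of interest.*"
  else if tool_name = "Advanced_Object_Detector_Tool" then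
    "*Displaying " ++ PySem.Int.toStr (pvCountLabel visual_outputs ["detected"]) ++ " advanced detection result(s) with enhanced object identification.*"
  else if tool_name = "Nuclei_Segmenter_Tool" then
    "*Showing " ++ PySem.Int.toStr (pvCountLabel visual_outputs ["segmented"]) ++ " segmentation result(s) with identified nuclei regions.*"
  else if tool_name = "Cell_Segmenter_Tool" then
    "*Showing " ++ PySem.Int.toStr (pvCountLabel visual_outputs ["segmented"]) ++ " segmentation result(s) with identified cell regions in phase-contrast images.*"
  else if tool_name = "Organoid_Segmenter_Tool" then
    "*Showing " ++ PySem.Int.toStr (pvCountLabel visual_outputs ["segmented"]) ++ " segmentation result(s) with identified organoid regions.*"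
  else if tool_name = "Single_Cell_Cropper_Tool" then
    "*Displaying " ++ PySem.Int.toStr (pvCountLabel visual_outputs ["crop"]) ++ " single-cell crop(s) generated from segmentation results (nuclei, cells, or organoids).*"
  else if tool_name = "Cell_State_Analyzer_Tool" then
    "*Displaying " ++ PySem.Int.toStr (pvCountLabel visual_outputs ["analysis", "distribution"]) ++ " cell state analysis result(s) with cell state distributions and statistics.*"
  else if tool_name = "Cell_Morphology_Analyzer_Tool" then
    "*Displaying cell morphology analysis results with detailed structural insights.*"
  else if tool_name = "Fibroblast_Activation_Detector_Tool" then
    "*Showing fibroblast activation state analysis with morphological indicators.*"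
  else
    "*Displaying " ++ PySem.Int.toStr (visual_outputs.length : Int) ++ " analysis result(s) from " ++ tool_name ++ ".*"

-- ===== PRECONDITION & SPEC =====
def Spec_generate_visual_description (tool_name : String) (result : List (String × Int)) (visual_outputs : List (String × String)) (out : String) : Prop := out = generate_visual_description_alt tool_name result visual_outputs
instance (tool_name : String) (result : List (String × Int)) (visual_outputs : List (String × String)) (out : String) : Decidable (Spec_generate_visual_description tool_name result visual_outputs out) := by unfold Spec_generate_visual_description; infer_instance

-- ===== CLAIM (what is proved, stated in full; the proofs are below) =====
def Claim_equal_generate_visual_description : Prop := ∀ (tool_name : String) (result : List (String × Int)) (visual_outputs : List (String × String)), Dom_generate_visual_description tool_name result visual_outputs → Spec_generate_visual_description tool_name result visual_outputs (generate_visual_description tool_name result visual_outputs)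

-- ===== LEMMAS AND PROOFS =====
theorem pvFold_processed (l : List (String × String)) (c : PVCounts) :
    (l.foldl pvStepA c).processed = c.processed + (l.countP (fun p => PySem.Str.isIn "processed" (PySem.Str.lower p.2)) : Int) := by
  induction l generalizing c with
  | nil => simp
  | cons a t ih => simp only [List.foldl_cons, ih, List.countP_cons, pvStepA]
                   split_ifs <;> push_cast <;> omega

theorem pvFold_segmented (l : List (String × String)) (c : PVCounts) :
    (l.foldl pvStepA c).segmented = c.segmented + (l.countP (fun p => PySem.Str.isIn "segmented" (PySem.Str.lower p.2)) : Int) := by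
  induction l generalizing c with
  | nil => simp
  | cons a t ih => simp only [List.foldl_cons, ih, List.countP_cons, pvStepA]
                   split_ifs <;> push_cast <;> omega

theorem pvFold_detected (l : List (String × String)) (c : PVCounts) :
    (l.foldl pvStepA c).detected = c.detected + (l.countP (fun p => PySem.Str.isIn "detected" (PySem.Str.lower p.2)) : Int) := by
  induction l generalizing c with
  | nil => simp
  | cons a t ih => simp only [List.foldl_cons, ih, List.countP_cons, pvStepA]
                   split_ifs <;> push_cast <;> omega

theorem pvFold_zoomed (l : List (String × String)) (c : PVCounts) :
    (l.foldl pvStepA c).zoomed = c.zoomed + (l.countP (fun p => PySem.Str.isIn "zoomed" (PySem.Str.lower p.2)) : Int) := by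
  induction l generalizing c with
  | nil => simp
  | cons a t ih => simp only [List.foldl_cons, ih, List.countP_cons, pvStepA]
                   split_ifs <;> push_cast <;> omega

theorem pvFold_cropped (l : List (String × String)) (c : PVCounts) :
    (l.foldl pvStepA c).cropped = c.cropped + (l.countP (fun p => PySem.Str.isIn "crop" (PySem.Str.lower p.2)) : Int) := by
  induction l generalizing c with
  | nil => simp
  | cons a t ih => simp only [List.foldl_cons, ih, List.countP_cons, pvStepA]
                   split_ifs <;> push_cast <;> omega

theorem pvFold_analyzed (l : List (String × String)) (c : PVCounts) :
    (l.foldl pvStepA c).analyzed = c.analyzed + (l.countP (fun p => PySem.Str.isIn "analysis" (PySem.Str.lower p.2) || PySem.Str.isIn "distribution" (PySem.Str.lower p.2)) : Int) := by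
  induction l generalizing c with
  | nil => simp
  | cons a t ih => simp only [List.foldl_cons, ih, List.countP_cons, pvStepA]
                   split_ifs <;> push_cast <;> omega

-- ===== VERDICT (by name: the statement is the Claim_ definition above) =====
set_option maxHeartbeats 1000000 in
theorem generate_visual_description_spec : Claim_equal_generate_visual_description := by
  intro tool_name result visual_outputs _
  unfold Spec_generate_visual_description
  unfold generate_visual_description generate_visual_description_alt
  by_cases hvo : visual_outputs = []
  · simp [hvo]
  · simp only [if_neg hvo, PySem.Dict.get?_insert, PySem.Dict.get?_empty]
    by_cases h1 : tool_name = "Image_Preprocessor_Tool"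
    · simp [h1, pvFold_processed, pvCountLabel]
    by_cases h2 : tool_name = "Object_Detector_Tool"
    · simp [h2, pvFold_detected, pvCountLabel]
    by_cases h3 : tool_name = "Relevant_Patch_Zoomer_Tool"
    · simp [h3, pvFold_zoomed, pvCountLabel]
    by_cases h4 : tool_name = "Advanced_Object_Detector_Tool"
    · simp [h4, pvFold_detected, pvCountLabel]
    by_cases h5 : tool_name = "Nuclei_Segmenter_Tool"
    · simp [h5, pvFold_segmented, pvCountLabel]
    by_cases h6 : tool_name = "Cell_Segmenter_Tool"
    · simp [h6, pvFold_segmented, pvCountLabel]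
    by_cases h7 : tool_name = "Organoid_Segmenter_Tool"
    · simp [h7, pvFold_segmented, pvCountLabel]
    by_cases h8 : tool_name = "Single_Cell_Cropper_Tool"
    · simp [h8, pvFold_cropped, pvCountLabel]
    by_cases h9 : tool_name = "Cell_State_Analyzer_Tool"
    · simp [h9, pvFold_analyzed, pvCountLabel]
    by_cases h10 : tool_name = "Cell_Morphology_Analyzer_Tool"
    · simp [h10]
    by_cases h11 : tool_name = "Fibroblast_Activation_Detector_Tool"
    · simp [h11]
    simp [h1, h2, h3, h4, h5, h6, h7, h8, h9, h10, h11]
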